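-- pv_equiv track=rewrite | github.com/DTUComputeStatisticsAndDataAnalysis/WristAngel_AnalysisPlan | utils/model.py | mapParticipantLabelstoCVlabel
-- ===== SOURCE A (Python) =====
-- def mapParticipantLabelstoCVlabel(participantLabel):
--
--     # Create a dictionary that maps each unique value in participantLabel to its index in the output array
--     value_to_index = {}
--     count = 0
--     for value in sorted(set(participantLabel)):
--         value_to_index[value] = count
--         count += 1
--
--     # Use the dictionary to populate the output array
--     output = [value_to_index[value] for value in participantLabel]
--
--     return output
-- ===== SOURCE B (Python) =====
-- def mapParticipantLabelstoCVlabel(participantLabel):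
--     # Dense rank without a lookup table: the rank of v is the number of
--     # distinct values strictly smaller than v, found by binary search in
--     # the sorted unique values.
--     uniq = sorted(set(participantLabel))
--     out = []
--     for v in participantLabel:
--         lo, hi = 0, len(uniq)
--         while lo < hi:
--             mid = (lo + hi) // 2
--             if uniq[mid] < v:
--                 lo = mid + 1
--             else:
--                 hi = mid
--         out.append(lo)
--     return out
-- ===== Notes on version B (the rewrite author's own statement) =====
-- stated objective: alternative
-- what changed: Replaces A's incrementally-built value-to-index lookup table by a direct counting definition of dense rank: each label's rank is the number of distinct values strictly below it, found by binary search in the sorted unique values, with no dict at all.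
import Mathlib
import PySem

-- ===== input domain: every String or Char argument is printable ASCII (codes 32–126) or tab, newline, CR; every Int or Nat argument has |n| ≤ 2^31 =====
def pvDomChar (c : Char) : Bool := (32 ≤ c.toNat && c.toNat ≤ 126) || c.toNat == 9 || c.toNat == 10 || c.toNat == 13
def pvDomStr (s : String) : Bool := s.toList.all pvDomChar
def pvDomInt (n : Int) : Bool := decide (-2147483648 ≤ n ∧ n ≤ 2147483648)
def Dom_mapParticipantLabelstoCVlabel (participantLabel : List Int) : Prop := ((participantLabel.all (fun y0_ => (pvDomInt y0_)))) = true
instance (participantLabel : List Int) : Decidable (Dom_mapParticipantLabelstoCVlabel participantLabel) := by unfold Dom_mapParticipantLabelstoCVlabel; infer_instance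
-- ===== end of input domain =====

-- B replaces A's incrementing-counter lookup table by binary search in the sorted unique
-- values (rank of v = number of distinct values below v); alternative decomposition, no dict.

-- ===== PORT A =====
-- A: build value_to_index over sorted(set(xs)) with an incrementing counter, then map lookups.
def mapParticipantLabelstoCVlabel (participantLabel : List Int) : List Int :=
  let su := PySem.List.sorted (PySem.Set.ofList participantLabel) (fun x => x) false
  let st := su.foldl
    (fun (p : PySem.Dict Int Int × Int) value => (p.1.insert value p.2, p.2 + 1))
    (PySem.Dict.empty, 0)
  -- value_to_index[value]: the key is always present (value ∈ set(participantLabel)),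
  -- so Python's KeyError is unreachable and getD never takes its default.
  participantLabel.map (fun value => st.1.getD value 0)

-- ===== PORT B =====
-- B's while-loop: lo, hi = 0, len(uniq); while lo < hi: mid = (lo+hi)//2; … (mid inlined).
-- uniq[mid]: mid always satisfies 0 ≤ lo ≤ mid < hi ≤ len(uniq), so Python's
-- IndexError is unreachable and pyGetD never takes its default.
def bsearchB (uniq : List Int) (v lo hi : Int) : Int :=
  if h : lo < hi then
    if PySem.List.pyGetD uniq (PySem.Int.floordiv (lo + hi) 2) 0 < v then
      bsearchB uniq v (PySem.Int.floordiv (lo + hi) 2 + 1) hi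
    else
      bsearchB uniq v lo (PySem.Int.floordiv (lo + hi) 2)
  else lo
termination_by (hi - lo).toNat
decreasing_by
  · have := PySem.Int.floordiv_two_mid_bounds (le_of_lt h)
    omega
  · have hlt : PySem.Int.floordiv (lo + hi) 2 < hi :=
      (PySem.Int.floordiv_lt_iff_lt_mul (by omega : (0:Int) < 2)).mpr (by omega)
    have := PySem.Int.floordiv_two_mid_bounds (le_of_lt h)
    omega

-- B: uniq = sorted(set(xs)); for each v append the binary-search insertion point.
def mapParticipantLabelstoCVlabel_alt (participantLabel : List Int) : List Int :=
  let uniq := PySem.List.sorted (PySem.Set.ofList participantLabel) (fun x => x) false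
  participantLabel.foldl (fun out v => out ++ [bsearchB uniq v 0 (uniq.length : Int)]) []

-- ===== PRECONDITION & SPEC =====
def Spec_mapParticipantLabelstoCVlabel (participantLabel : List Int) (out : List Int) : Prop := out = mapParticipantLabelstoCVlabel_alt participantLabel
instance (participantLabel : List Int) (out : List Int) : Decidable (Spec_mapParticipantLabelstoCVlabel participantLabel out) := by unfold Spec_mapParticipantLabelstoCVlabel; infer_instance

-- ===== CLAIM (what is proved, stated in full; the proofs are below) =====
def Claim_equal_mapParticipantLabelstoCVlabel : Prop := ∀ (participantLabel : List Int), Dom_mapParticipantLabelstoCVlabel participantLabel → Spec_mapParticipantLabelstoCVlabel participantLabel (mapParticipantLabelstoCVlabel participantLabel)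

-- ===== LEMMAS AND PROOFS =====

-- Folding A's dict-building step over a list not containing v leaves the lookup of v unchanged.
lemma build_preserves (L : List Int) (d : PySem.Dict Int Int) (c v : Int) (hv : v ∉ L) :
    ((L.foldl (fun (p : PySem.Dict Int Int × Int) value => (p.1.insert value p.2, p.2 + 1))
      (d, c)).1).getD v 0 = d.getD v 0 := by
  induction L generalizing d c with
  | nil => rfl
  | cons x t ih =>
      simp only [List.mem_cons, not_or] at hv
      simp only [List.foldl_cons]
      rw [ih _ _ hv.2, PySem.Dict.getD_insert_of_ne _ _ _ hv.1]

-- On a strictly increasing list containing v, A's built dict maps v to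
-- the start counter plus the number of elements below v.
lemma build_lookup (L : List Int) (d : PySem.Dict Int Int) (c v : Int)
    (hv : v ∈ L) (hp : L.Pairwise (· < ·)) :
    ((L.foldl (fun (p : PySem.Dict Int Int × Int) value => (p.1.insert value p.2, p.2 + 1))
      (d, c)).1).getD v 0 = c + (L.countP (fun u => decide (u < v)) : Int) := by
  induction L generalizing d c with
  | nil => cases hv
  | cons x t ih =>
      simp only [List.pairwise_cons] at hp
      simp only [List.foldl_cons, List.countP_cons]
      rcases List.mem_cons.mp hv with h | h
      · subst h
        have hnot : v ∉ t := fun hm => lt_irrefl v (hp.1 v hm)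
        have hc : t.countP (fun u => decide (u < v)) = 0 := by
          rw [List.countP_eq_zero]
          intro u hu
          simp only [decide_eq_true_eq]
          exact not_lt.mpr (le_of_lt (hp.1 u hu))
        rw [build_preserves t _ _ _ hnot, PySem.Dict.getD_insert_self, hc]
        simp
      · have hx : x < v := hp.1 v h
        rw [ih _ _ h hp.2]
        simp [hx]
        omega

-- If values below index b are < v and values from index b on are not, then b counts
-- the elements below v.
lemma countP_eq_boundary (L : List Int) (v b : Int) (h0 : 0 ≤ b) (hb : b ≤ (L.length : Int))
    (Hlo : ∀ (j : Nat) (hj : j < L.length), (j : Int) < b → L[j] < v)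
    (Hhi : ∀ (j : Nat) (hj : j < L.length), b ≤ (j : Int) → ¬ L[j] < v) :
    (L.countP (fun u => decide (u < v)) : Int) = b := by
  have hsplit : L = L.take b.toNat ++ L.drop b.toNat := (List.take_append_drop _ _).symm
  rw [hsplit, List.countP_append] at *
  have h1 : (L.take b.toNat).countP (fun u => decide (u < v)) = (L.take b.toNat).length := by
    rw [List.countP_eq_length]
    intro a ha
    obtain ⟨i, hi, rfl⟩ := List.mem_iff_getElem.mp ha
    have hilen : i < L.length := lt_of_lt_of_le hi (by simp)
    rw [List.getElem_take]
    exact decide_eq_true (Hlo i hilen (by simp at hi; omega))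
  have h2 : (L.drop b.toNat).countP (fun u => decide (u < v)) = 0 := by
    rw [List.countP_eq_zero]
    intro a ha
    obtain ⟨i, hi, rfl⟩ := List.mem_iff_getElem.mp ha
    rw [List.getElem_drop]
    simp only [List.length_drop] at hi
    simp only [decide_eq_true_eq]
    exact Hhi (b.toNat + i) (by omega) (by omega)
  rw [h1, h2, List.length_take]
  omega

-- B's binary search, run with the invariant that indices below lo hold values < v and
-- indices from hi on do not, returns the count of elements below v.
lemma bsearchB_spec (L : List Int) (v : Int)
    (hmono : ∀ (p q : Nat) (hpq : p ≤ q) (hq : q < L.length), L[p]'(by omega) ≤ L[q]) :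
    ∀ (n : Nat) (lo hi : Int), (hi - lo).toNat ≤ n → 0 ≤ lo → lo ≤ hi → hi ≤ (L.length : Int) →
    (∀ (j : Nat) (hj : j < L.length), (j : Int) < lo → L[j] < v) →
    (∀ (j : Nat) (hj : j < L.length), hi ≤ (j : Int) → ¬ L[j] < v) →
    bsearchB L v lo hi = (L.countP (fun u => decide (u < v)) : Int) := by
  intro n
  induction n with
  | zero =>
      intro lo hi hn h0 hlh hhl Hlo Hhi
      have heq : lo = hi := by omega
      rw [bsearchB]
      rw [dif_neg (by omega : ¬ lo < hi)]
      exact (countP_eq_boundary L v lo h0 (by omega) Hlo (heq ▸ Hhi)).symm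
  | succ m ih =>
      intro lo hi hn h0 hlh hhl Hlo Hhi
      by_cases h : lo < hi
      · have hmid := PySem.Int.floordiv_two_mid_bounds (le_of_lt h)
        have hmidlt : PySem.Int.floordiv (lo + hi) 2 < hi :=
          (PySem.Int.floordiv_lt_iff_lt_mul (by omega : (0:Int) < 2)).mpr (by omega)
        set mid := PySem.Int.floordiv (lo + hi) 2 with hmiddef
        have hmidn : mid.toNat < L.length := by omega
        rw [bsearchB, dif_pos h, ← hmiddef,
            PySem.List.pyGetD_eq_getElem L 0 (by omega) (by omega)]
        split_ifs with hc
        · -- uniq[mid] < v : lo becomes mid + 1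
          apply ih (mid + 1) hi (by omega) (by omega) (by omega) hhl
          · intro j hj hjlt
            have : L[j] ≤ L[mid.toNat] := hmono j mid.toNat (by omega) hmidn
            exact lt_of_le_of_lt this hc
          · exact Hhi
        · -- not uniq[mid] < v : hi becomes mid
          apply ih lo mid (by omega) h0 (by omega) (by omega) Hlo
          intro j hj hjge hcontra
          exact hc (lt_of_le_of_lt (hmono mid.toNat j (by omega) hj) hcontra)
      · rw [bsearchB, dif_neg h]
        exact (countP_eq_boundary L v lo h0 (by omega) Hlo
          (fun j hj hge => Hhi j hj (by omega))).symm

-- ===== VERDICT (by name: the statement is the Claim_ definition above) =====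
theorem mapParticipantLabelstoCVlabel_spec : Claim_equal_mapParticipantLabelstoCVlabel := by
  intro xs _
  unfold Spec_mapParticipantLabelstoCVlabel mapParticipantLabelstoCVlabel mapParticipantLabelstoCVlabel_alt
  rw [PySem.List.foldl_append_singleton_eq_map]
  apply List.map_congr_left
  intro v hv
  have hmem : v ∈ PySem.List.sorted (PySem.Set.ofList xs) (fun x => x) false := by
    rw [PySem.List.mem_sorted, PySem.Set.mem_ofList]
    exact hv
  rw [build_lookup _ _ _ _ hmem (PySem.List.sorted_ofList_pairwise_lt xs),
      bsearchB_spec _ v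
        (fun p q hpq hq => PySem.List.sorted_id_getElem_mono (PySem.Set.ofList xs) hpq hq)
        ((((PySem.List.sorted (PySem.Set.ofList xs) (fun x => x) false).length : Int) - 0).toNat)
        0 _ (le_refl _) (le_refl _) (by positivity) (by simp)
        (by intro j hj hjlt; omega)
        (by intro j hj hge; omega)]
  simp
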